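-- pv_equiv track=rewrite | github.com/CODeRUS/rates-api | cash_report.py | _strip_standalone_cash_source_tokens
-- ===== SOURCE A (Python) =====
-- from typing import Any, Dict, List, Optional, Tuple
--
-- _KNOWN_CASH_SOURCE_TOKENS = frozenset({"all", "banki", "vbr", "rbc"})
--
-- def _strip_standalone_cash_source_tokens(argv: List[str]) -> Tuple[List[str], Optional[str]]:
--     spec: Optional[str] = None
--     out: List[str] = []
--     i = 0
--     while i < len(argv):
--         a = argv[i]
--         if a.startswith("-"):
--             out.extend(argv[i:])
--             break
--         al = a.lower()
--         if al in _KNOWN_CASH_SOURCE_TOKENS: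
--             spec = al
--             i += 1
--             continue
--         out.append(a)
--         i += 1
--     return out, spec
-- ===== SOURCE B (Python) =====
-- from typing import List, Optional, Tuple
--
-- _KNOWN_CASH_SOURCE_TOKENS = frozenset({"all", "banki", "vbr", "rbc"})
--
-- def _strip_standalone_cash_source_tokens(argv: List[str]) -> Tuple[List[str], Optional[str]]:
--     cut = len(argv)
--     for j, a in enumerate(argv):
--         if a.startswith("-"):
--             cut = j
--             break
--     head, tail = argv[:cut], argv[cut:]
--     out = [a for a in head if a.lower() not in _KNOWN_CASH_SOURCE_TOKENS] + tail
--     spec: Optional[str] = None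
--     for a in reversed(head):
--         al = a.lower()
--         if al in _KNOWN_CASH_SOURCE_TOKENS:
--             spec = al
--             break
--     return out, spec
-- ===== Notes on version B (the rewrite author's own statement) =====
-- stated objective: simpler
-- what changed: Replaces A's index-driven while loop with break/continue and a mutable spec by a split at the first dash argument, a comprehension filtering the head, the tail copied verbatim, and an independent reverse scan of the head for the last known token.
import Mathlib
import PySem

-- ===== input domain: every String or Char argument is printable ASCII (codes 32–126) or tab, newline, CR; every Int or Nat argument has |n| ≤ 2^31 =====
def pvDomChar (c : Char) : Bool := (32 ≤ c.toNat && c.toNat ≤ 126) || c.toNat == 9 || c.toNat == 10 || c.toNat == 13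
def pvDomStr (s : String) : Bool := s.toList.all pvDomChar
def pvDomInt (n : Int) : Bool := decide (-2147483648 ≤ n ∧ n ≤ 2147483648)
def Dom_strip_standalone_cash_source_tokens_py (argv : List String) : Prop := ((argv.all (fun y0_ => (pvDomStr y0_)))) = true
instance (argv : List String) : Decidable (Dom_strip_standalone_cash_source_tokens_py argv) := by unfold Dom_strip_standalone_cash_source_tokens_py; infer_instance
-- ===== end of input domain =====

-- B replaces A's single index-driven while loop (with break/continue and mutable spec) by a
-- split at the first dash argument: filter the head, copy the tail verbatim, and find spec by a
-- separate reverse scan of the head; objective: simpler decomposition, same cost.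

-- ===== PORT A =====
def pvTokens : List String := ["all", "banki", "vbr", "rbc"]

-- A's while loop: index i becomes structural recursion on the remaining suffix;
-- same state (out, spec), branches in A's order.
def pvGoA : List String → List String → Option String → List String × Option String
  | [], out, spec => (out, spec)
  | a :: rest, out, spec =>
    if PySem.Str.startswith a "-" then (out ++ (a :: rest), spec)
    else
      let al := PySem.Str.lower a
      if pvTokens.contains al then pvGoA rest out (some al)
      else pvGoA rest (out ++ [a]) spec

def strip_standalone_cash_source_tokens_py (argv : List String) : List String × Option String :=
  pvGoA argv [] none

-- ===== PORT B =====
def strip_standalone_cash_source_tokens_py_alt (argv : List String) : List String × Option String :=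
  let head := argv.takeWhile (fun a => !(PySem.Str.startswith a "-"))
  let tail := argv.dropWhile (fun a => !(PySem.Str.startswith a "-"))
  let out := head.filter (fun a => !(pvTokens.contains (PySem.Str.lower a))) ++ tail
  let spec := (head.reverse.find? (fun a => pvTokens.contains (PySem.Str.lower a))).map PySem.Str.lower
  (out, spec)

-- ===== PRECONDITION & SPEC =====
def Spec_strip_standalone_cash_source_tokens_py (argv : List String) (out : List String × Option String) : Prop := out = strip_standalone_cash_source_tokens_py_alt argv
instance (argv : List String) (out : List String × Option String) : Decidable (Spec_strip_standalone_cash_source_tokens_py argv out) := by unfold Spec_strip_standalone_cash_source_tokens_py; infer_instance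

-- ===== CLAIM (what is proved, stated in full; the proofs are below) =====
def Claim_equal_strip_standalone_cash_source_tokens_py : Prop := ∀ (argv : List String), Dom_strip_standalone_cash_source_tokens_py argv → Spec_strip_standalone_cash_source_tokens_py argv (strip_standalone_cash_source_tokens_py argv)

-- ===== LEMMAS AND PROOFS =====
theorem pvGoA_eq (l : List String) : ∀ (out : List String) (spec : Option String),
    pvGoA l out spec =
      (out ++ (l.takeWhile (fun a => !(PySem.Str.startswith a "-"))).filter
          (fun a => !(pvTokens.contains (PySem.Str.lower a)))
        ++ l.dropWhile (fun a => !(PySem.Str.startswith a "-")),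
       (((l.takeWhile (fun a => !(PySem.Str.startswith a "-"))).reverse.find?
          (fun a => pvTokens.contains (PySem.Str.lower a))).map PySem.Str.lower).or spec) := by
  induction l with
  | nil => intro out spec; simp [pvGoA]
  | cons a rest ih =>
    intro out spec
    simp only [pvGoA, List.takeWhile_cons, List.dropWhile_cons]
    by_cases hd : PySem.Str.startswith a "-" = true
    · rw [hd]; simp
    · rw [Bool.not_eq_true] at hd; rw [hd]
      by_cases ht : pvTokens.contains (PySem.Str.lower a) = true
      · have ht' : PySem.Str.lower a ∈ pvTokens := by simpa using ht
        rw [ht]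
        simp only [Bool.not_false, Bool.false_eq_true, if_false, if_true, ih,
          List.reverse_cons, List.find?_append, List.filter_cons, ht, Bool.not_true]
        rw [show (List.find? (fun a => pvTokens.contains (PySem.Str.lower a)) [a]) = some a
          from by simp [ht']]
        cases (rest.takeWhile (fun a => !(PySem.Str.startswith a "-"))).reverse.find?
            (fun a => pvTokens.contains (PySem.Str.lower a)) <;> simp [Option.or]
      · have ht' : PySem.Str.lower a ∉ pvTokens := by simpa using ht
        rw [Bool.not_eq_true] at ht; rw [ht]
        simp only [Bool.not_false, Bool.false_eq_true, if_false, if_true, ih,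
          List.reverse_cons, List.find?_append, List.filter_cons]
        rw [show (List.find? (fun a => pvTokens.contains (PySem.Str.lower a)) [a]) = none
          from by simp [ht']]
        rw [Prod.mk.injEq]
        refine ⟨by simp [ht'], ?_⟩
        cases (rest.takeWhile (fun a => !(PySem.Str.startswith a "-"))).reverse.find?
            (fun a => pvTokens.contains (PySem.Str.lower a)) <;> simp [Option.or]

-- ===== VERDICT (by name: the statement is the Claim_ definition above) =====
theorem strip_standalone_cash_source_tokens_py_spec : Claim_equal_strip_standalone_cash_source_tokens_py := by
  intro argv _
  unfold Spec_strip_standalone_cash_source_tokens_py strip_standalone_cash_source_tokens_py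
    strip_standalone_cash_source_tokens_py_alt
  rw [pvGoA_eq]
  simp only [List.nil_append, Option.or_none]
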